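-- pv_equiv track=rewrite | github.com/Midhilesh4890/Leetcode-Problems | Google/testrunner.py | find_faulty_pair
-- ===== SOURCE A (Python) =====
-- from typing import List, Optional
--
-- def test_runner(tests: List[int]) -> bool:
--     """
--     Simulates the test execution and determines if the test set passes.
--     Returns True if the test set runs successfully, False if it fails.
--
--     Assumed failure condition: Running test 7 and test 10 together causes a failure.
--     """
--     first = False
--     second = False
--     for test in tests:
--         if test == 7:
--             first = True
--         if test == 10:
--             second = True
--     return not (first and second)  # Returns False if both 7 and 10 are in the set (failure case)
--
-- def find_faulty_pair(tests: List[int]) -> Optional[List[int]]: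
--     """
--     Identifies at least one pair of tests that fail when run together using a divide-and-conquer approach.
--
--     Steps:
--     1. Narrow down the failing subset using binary search.
--     2. Once isolated, systematically test pairs with the found faulty test.
--
--     :param tests: List of unit test IDs.
--     :return: A list containing one failing pair of tests.
--     """
--
--     left, right = 0, len(tests) - 1
--
--     # Step 1: Find a minimal failing subset using binary search
--     while left < right:
--         mid = (left + right) // 2
--         subset = tests[left:mid + 1]  # Take the left half
--
--         if not test_runner(subset):  # If this subset fails, the faulty pair must be here
--             right = mid  # Reduce the search space to the failing subset
--         else:
--             left = mid + 1  # Move to the right half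
--
--     # After binary search, left index should contain one faulty test
--     faulty_test = tests[left]
--
--     # Step 2: Find another test that, when run with the faulty test, causes a failure
--     for test in tests:
--         if test != faulty_test and not test_runner([test, faulty_test]):
--             return [test, faulty_test]  # Return the first failing pair found
--
--     return None  # Should not reach here under given assumptions
-- ===== SOURCE B (Python) =====
-- from typing import List, Optional
--
-- def find_faulty_pair(tests: List[int]) -> Optional[List[int]]:
--     n = len(tests)
--     # one pass: prefix counts of 7 and of 10
--     p7 = [0]
--     p10 = [0]
--     c7 = 0
--     c10 = 0
--     for t in tests:
--         c7 += (t == 7)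
--         c10 += (t == 10)
--         p7.append(c7)
--         p10.append(c10)
--     # same bisection, but each window-failure check is O(1) via prefix counts
--     left, right = 0, n - 1
--     while left < right:
--         mid = (left + right) // 2
--         if p7[mid + 1] - p7[left] > 0 and p10[mid + 1] - p10[left] > 0:
--             right = mid
--         else:
--             left = mid + 1
--     faulty = tests[left]
--     # a pair fails iff it is {7, 10}; partner existence read off the totals
--     if faulty == 7 and p10[n] > 0:
--         return [10, 7]
--     if faulty == 10 and p7[n] > 0:
--         return [7, 10]
--     return None
-- ===== Notes on version B (the rewrite author's own statement) =====
-- stated objective: alternative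
-- what changed: Window-failure checks in the bisection become O(1) prefix-count comparisons (one pass builds prefix counts of 7 and 10) and the final pair search becomes a closed-form decision from the faulty test and the totals, replacing A's per-step slice-and-rescan test_runner and its linear partner scan.
-- outside the precondition, e.g. on find_faulty_pair([]): A raises IndexError, B raises IndexError
import Mathlib
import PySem

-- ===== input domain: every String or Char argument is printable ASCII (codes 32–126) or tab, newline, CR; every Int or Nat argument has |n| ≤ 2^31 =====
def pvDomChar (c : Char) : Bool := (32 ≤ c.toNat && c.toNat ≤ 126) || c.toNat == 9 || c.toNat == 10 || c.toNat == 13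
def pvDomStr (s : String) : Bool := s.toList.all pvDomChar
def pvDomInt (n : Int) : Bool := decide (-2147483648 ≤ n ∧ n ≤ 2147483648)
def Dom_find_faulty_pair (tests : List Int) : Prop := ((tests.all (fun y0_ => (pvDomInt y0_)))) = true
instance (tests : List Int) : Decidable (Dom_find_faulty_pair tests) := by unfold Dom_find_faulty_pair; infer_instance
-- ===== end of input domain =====

-- B replaces A's slice-and-rescan window checks by O(1) prefix-count comparisons and the
-- final partner scan by a closed-form decision (alternative structure; same asymptotic cost).

-- ===== PORT A =====
def test_runner (tests : List Int) : Bool :=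
  let st := tests.foldl
    (fun (p : Bool × Bool) t =>
      ((if t = 7 then true else p.1), (if t = 10 then true else p.2)))
    (false, false)
  !(st.1 && st.2)

-- A's while-loop; fuel merely bounds the iterations (tests.length always suffices)
def loopA (tests : List Int) (fuel : Nat) (left right : Int) : Int :=
  match fuel with
  | 0 => left
  | fuel + 1 =>
    if left < right then
      let mid := PySem.Int.floordiv (left + right) 2
      let subset := PySem.List.slice tests (some left) (some (mid + 1))
      if test_runner subset = false then loopA tests fuel left mid
      else loopA tests fuel (mid + 1) right
    else left

def searchA (tests : List Int) (faulty : Int) : Option (List Int) :=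
  match tests with
  | [] => none
  | t :: rest =>
    if t ≠ faulty ∧ test_runner [t, faulty] = false then some [t, faulty]
    else searchA rest faulty

def find_faulty_pair (tests : List Int) : Option (List Int) :=
  let left := loopA tests tests.length 0 ((tests.length : Int) - 1)
  match PySem.List.pyGet? tests left with
  | none => none          -- IndexError (tests = []); excluded by Pre_
  | some faulty => searchA tests faulty

-- ===== PORT B =====
-- prefix-count list [0, c1, …, cn] of occurrences of x (B's first for-loop)
def prefixCounts (x : Int) : List Int → Int → List Int
  | [], c => [c]
  | t :: rest, c => c :: prefixCounts x rest (c + (if t = x then 1 else 0))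

def loopB (p7 p10 : List Int) (fuel : Nat) (left right : Int) : Int :=
  match fuel with
  | 0 => left
  | fuel + 1 =>
    if left < right then
      let mid := PySem.Int.floordiv (left + right) 2
      if PySem.List.pyGetD p7 (mid + 1) 0 - PySem.List.pyGetD p7 left 0 > 0 ∧
         PySem.List.pyGetD p10 (mid + 1) 0 - PySem.List.pyGetD p10 left 0 > 0
      then loopB p7 p10 fuel left mid
      else loopB p7 p10 fuel (mid + 1) right
    else left

def find_faulty_pair_alt (tests : List Int) : Option (List Int) :=
  let n := tests.length
  let p7 := prefixCounts 7 tests 0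
  let p10 := prefixCounts 10 tests 0
  let left := loopB p7 p10 n 0 ((n : Int) - 1)
  match PySem.List.pyGet? tests left with
  | none => none          -- IndexError (tests = []); excluded by Pre_
  | some faulty =>
    if faulty = 7 then
      (if PySem.List.pyGetD p10 (n : Int) 0 > 0 then some [10, 7] else none)
    else if faulty = 10 then
      (if PySem.List.pyGetD p7 (n : Int) 0 > 0 then some [7, 10] else none)
    else none

-- ===== PRECONDITION & SPEC =====
-- Python A raises IndexError (tests[left] on an empty list) iff tests = []; nothing else is excluded.
def Pre_find_faulty_pair (tests : List Int) : Prop := tests ≠ []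
instance (tests : List Int) : Decidable (Pre_find_faulty_pair tests) := by unfold Pre_find_faulty_pair; infer_instance
def pvWitness_find_faulty_pair : List Int := [7, 10]

def Spec_find_faulty_pair (tests : List Int) (out : Option (List Int)) : Prop := out = find_faulty_pair_alt tests
instance (tests : List Int) (out : Option (List Int)) : Decidable (Spec_find_faulty_pair tests out) := by unfold Spec_find_faulty_pair; infer_instance

-- ===== CLAIM (what is proved, stated in full; the proofs are below) =====
def Claim_equal_find_faulty_pair : Prop := ∀ (tests : List Int), Dom_find_faulty_pair tests → Pre_find_faulty_pair tests → Spec_find_faulty_pair tests (find_faulty_pair tests)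

-- ===== LEMMAS AND PROOFS =====

theorem test_runner_foldl (xs : List Int) : ∀ (a b : Bool),
    xs.foldl (fun (p : Bool × Bool) t =>
      ((if t = 7 then true else p.1), (if t = 10 then true else p.2))) (a, b)
    = (a || decide ((7 : Int) ∈ xs), b || decide ((10 : Int) ∈ xs)) := by
  induction xs with
  | nil => simp
  | cons t rest ih =>
    intro a b
    simp only [List.foldl_cons]
    rw [show ((if t = (7:Int) then true else a), (if t = (10:Int) then true else b))
          = ((a || decide (t = 7)), (b || decide (t = 10))) from by
        by_cases h7 : t = (7:Int) <;> by_cases h10 : t = (10:Int) <;> simp [h7, h10]]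
    rw [ih]
    by_cases h7 : t = (7:Int) <;> by_cases h10 : t = (10:Int) <;>
      simp_all [List.mem_cons, eq_comm]

theorem test_runner_eq_false (xs : List Int) :
    test_runner xs = false ↔ ((7 : Int) ∈ xs ∧ (10 : Int) ∈ xs) := by
  unfold test_runner
  rw [test_runner_foldl xs false false]
  simp

theorem prefixCounts_getD (x : Int) (ts : List Int) : ∀ (i : Nat) (c : Int), i ≤ ts.length →
    (prefixCounts x ts c).getD i 0 = c + ((ts.take i).count x : Int) := by
  induction ts with
  | nil =>
    intro i c hi
    have h0 : i = 0 := Nat.le_zero.mp hi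
    subst h0
    simp [prefixCounts]
  | cons t rest ih =>
    intro i c hi
    cases i with
    | zero => simp [prefixCounts]
    | succ j =>
      simp only [prefixCounts, List.getD_cons_succ, List.take_succ_cons]
      rw [ih j _ (by simpa using hi)]
      rcases eq_or_ne t x with h | h
      · subst h
        simp
        ring
      · simp [h]

-- window check equality: the slice tests[l : mid+1] fails iff both prefix-count differences are positive
theorem check_eq (tests : List Int) (l mid : Int)
    (hl : 0 ≤ l) (hlm : l ≤ mid) (hmn : mid < (tests.length : Int)) :
    (PySem.List.pyGetD (prefixCounts 7 tests 0) (mid + 1) 0 - PySem.List.pyGetD (prefixCounts 7 tests 0) l 0 > 0 ∧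
     PySem.List.pyGetD (prefixCounts 10 tests 0) (mid + 1) 0 - PySem.List.pyGetD (prefixCounts 10 tests 0) l 0 > 0)
    ↔ test_runner (PySem.List.slice tests (some l) (some (mid + 1))) = false := by
  rw [test_runner_eq_false]
  have hLn : l = ((l.toNat : Nat) : Int) := by omega
  have hMn : mid + 1 = (((mid + 1).toNat : Nat) : Int) := by omega
  rw [hLn, hMn, PySem.List.slice_natCast]
  rw [PySem.List.pyGetD_natCast, PySem.List.pyGetD_natCast, PySem.List.pyGetD_natCast,
      PySem.List.pyGetD_natCast]
  have hsplit : ∀ (x : Int),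
      (tests.take (mid + 1).toNat).count x
        = (tests.take l.toNat).count x
          + ((tests.drop l.toNat).take ((mid + 1).toNat - l.toNat)).count x := by
    intro x
    conv_lhs => rw [show (mid + 1).toNat = l.toNat + ((mid + 1).toNat - l.toNat) from by omega]
    rw [List.take_add, List.count_append]
  have c7 := prefixCounts_getD 7 tests
  have c10 := prefixCounts_getD 10 tests
  rw [c7 _ _ (by omega), c7 _ _ (by omega), c10 _ _ (by omega), c10 _ _ (by omega),
      hsplit 7, hsplit 10]
  constructor
  · rintro ⟨h7, h10⟩
    constructor <;> rw [← List.count_pos_iff] <;> omega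
  · rintro ⟨h7, h10⟩
    rw [← List.count_pos_iff] at h7 h10
    omega

theorem loops_eq (tests : List Int) : ∀ (fuel : Nat) (l r : Int),
    0 ≤ l → r < (tests.length : Int) →
    loopA tests fuel l r = loopB (prefixCounts 7 tests 0) (prefixCounts 10 tests 0) fuel l r := by
  intro fuel
  induction fuel with
  | zero => intro l r _ _; rfl
  | succ fuel ih =>
    intro l r hl hr
    simp only [loopA, loopB]
    by_cases hlr : l < r
    · simp only [hlr, if_true]
      have hmid := PySem.Int.floordiv_two_mid_bounds (lo := l) (hi := r) (by omega)
      set mid := PySem.Int.floordiv (l + r) 2 with hm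
      have hchk := check_eq tests l mid hl (by omega) (by omega)
      by_cases hc : test_runner (PySem.List.slice tests (some l) (some (mid + 1))) = false
      · rw [if_pos hc, if_pos (hchk.mpr hc)]
        exact ih l mid hl (by omega)
      · rw [if_neg hc, if_neg (fun h => hc (hchk.mp h))]
        exact ih (mid + 1) r (by omega) hr
    · simp [hlr]

theorem searchA_eq (faulty : Int) : ∀ (tests : List Int),
    searchA tests faulty =
      (if faulty = 7 then (if (10 : Int) ∈ tests then some [10, 7] else none)
       else if faulty = 10 then (if (7 : Int) ∈ tests then some [7, 10] else none)
       else none) := by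
  intro tests
  induction tests with
  | nil => by_cases h7 : faulty = (7 : Int) <;> by_cases h10 : faulty = (10 : Int) <;> simp_all [searchA]
  | cons t rest ih =>
    simp only [searchA, ih]
    have hpair : (test_runner [t, faulty] = false) ↔ ((7 : Int) ∈ [t, faulty] ∧ (10 : Int) ∈ [t, faulty]) :=
      test_runner_eq_false _
    by_cases h7 : faulty = (7 : Int)
    · subst h7
      by_cases ht : t = (10 : Int)
      · subst ht
        rw [if_pos (show (10 : Int) ≠ 7 ∧ test_runner [10, 7] = false from by
          exact ⟨by decide, by decide⟩)]
        simp [List.mem_cons]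
      · have hcond : ¬ ((t : Int) ≠ 7 ∧ test_runner [t, 7] = false) := by
          rw [hpair]
          rintro ⟨hne, _, hmem10⟩
          simp only [List.mem_cons, List.not_mem_nil, or_false] at hmem10
          rcases hmem10 with h | h <;> omega
        rw [if_neg hcond]
        have ht' : ¬ ((10 : Int) = t) := fun h => ht h.symm
        simp [List.mem_cons, ht']
    · by_cases h10 : faulty = (10 : Int)
      · subst h10
        by_cases ht : t = (7 : Int)
        · subst ht
          rw [if_pos (show (7 : Int) ≠ 10 ∧ test_runner [7, 10] = false from by
            exact ⟨by decide, by decide⟩)]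
          simp [List.mem_cons]
        · have hcond : ¬ ((t : Int) ≠ 10 ∧ test_runner [t, 10] = false) := by
            rw [hpair]
            rintro ⟨hne, hmem7, _⟩
            simp only [List.mem_cons, List.not_mem_nil, or_false] at hmem7
            rcases hmem7 with h | h <;> omega
          rw [if_neg hcond]
          have ht' : ¬ ((7 : Int) = t) := fun h => ht h.symm
          simp [List.mem_cons, ht']
      · have hcond : ¬ ((t : Int) ≠ faulty ∧ test_runner [t, faulty] = false) := by
          rw [hpair]
          rintro ⟨hne, hmem7, hmem10⟩
          simp only [List.mem_cons, List.not_mem_nil, or_false] at hmem7 hmem10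
          rcases hmem7 with h | h <;> rcases hmem10 with h' | h' <;> omega
        rw [if_neg hcond]
        simp [h7, h10]

theorem pyGetD_prefixCounts_len (x : Int) (tests : List Int) :
    PySem.List.pyGetD (prefixCounts x tests 0) ((tests.length : Nat) : Int) 0
      = (tests.count x : Int) := by
  rw [PySem.List.pyGetD_natCast, prefixCounts_getD x tests tests.length 0 (le_refl _)]
  simp

theorem ffp_eq (tests : List Int) : find_faulty_pair tests = find_faulty_pair_alt tests := by
  simp only [find_faulty_pair, find_faulty_pair_alt]
  rw [← loops_eq tests tests.length 0 ((tests.length : Int) - 1) (by omega) (by omega)]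
  cases hget : PySem.List.pyGet? tests (loopA tests tests.length 0 ((tests.length : Int) - 1)) with
  | none => rfl
  | some faulty =>
    show searchA tests faulty =
      (if faulty = 7 then
        (if PySem.List.pyGetD (prefixCounts 10 tests 0) ((tests.length : Nat) : Int) 0 > 0 then some [10, 7] else none)
       else if faulty = 10 then
        (if PySem.List.pyGetD (prefixCounts 7 tests 0) ((tests.length : Nat) : Int) 0 > 0 then some [7, 10] else none)
       else none)
    rw [searchA_eq, pyGetD_prefixCounts_len, pyGetD_prefixCounts_len]
    by_cases h7 : faulty = (7 : Int) <;> by_cases h10 : faulty = (10 : Int) <;>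
      simp_all [List.count_pos_iff, Int.natCast_pos]

-- ===== VERDICT (by name: the statement is the Claim_ definition above) =====
theorem find_faulty_pair_spec : Claim_equal_find_faulty_pair := by
  intro tests _ _
  unfold Spec_find_faulty_pair
  exact ffp_eq tests
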